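-- pv_equiv track=rewrite | github.com/embydextrous/Interview | matrix/79-findLargestSquareSurroundedByX.py | createVMatrix
-- ===== SOURCE A (Python) =====
-- def createVMatrix(M, R, C):
--     V = [[0 for j in range(C)] for j in range(R)]
--     for i in range(R):
--         for j in range(C):
--             if M[i][j] == 'X':
--                 if i == 0:
--                     V[i][j] = 1
--                 else:
--                     V[i][j] = V[i-1][j] + 1
--     return V
-- ===== SOURCE B (Python) =====
-- def createVMatrix(M, R, C):
--     res = []
--     for i in range(R):
--         row = []
--         for j in range(C):
--             k = i
--             while k >= 0 and M[k][j] == 'X':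
--                 k -= 1
--             row.append(i - k)
--         res.append(row)
--     return res
-- ===== Notes on version B (the rewrite author's own statement) =====
-- stated objective: alternative
-- what changed: Each cell independently walks upward through its column counting consecutive 'X's (i - k after the walk), instead of A's dynamic-programming pass that reads back V[i-1][j]; no auxiliary matrix is pre-built and no previous-row state is reused.
import Mathlib
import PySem

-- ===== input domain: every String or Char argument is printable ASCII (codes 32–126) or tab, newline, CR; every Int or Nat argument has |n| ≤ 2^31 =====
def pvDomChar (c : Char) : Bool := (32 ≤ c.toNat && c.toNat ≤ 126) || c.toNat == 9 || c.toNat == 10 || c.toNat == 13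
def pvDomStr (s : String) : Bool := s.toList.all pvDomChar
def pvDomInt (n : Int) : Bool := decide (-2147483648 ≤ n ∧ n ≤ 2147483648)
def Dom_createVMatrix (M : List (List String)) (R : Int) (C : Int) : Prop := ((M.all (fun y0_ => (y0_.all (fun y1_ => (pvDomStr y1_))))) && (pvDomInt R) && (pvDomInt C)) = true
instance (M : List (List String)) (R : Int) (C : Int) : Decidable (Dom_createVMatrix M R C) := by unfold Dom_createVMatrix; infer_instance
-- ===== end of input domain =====

-- B replaces A's dynamic-programming pass (which reads back V[i-1][j]) by an independent
-- per-cell upward scan of the column; no auxiliary matrix, no reused state (alternative, not faster).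

-- ===== PORT A =====
def createVMatrix (M : List (List String)) (R : Int) (C : Int) : List (List Int) :=
  let V := (PySem.List.pyRange 0 R 1).map (fun _ => (PySem.List.pyRange 0 C 1).map (fun _ => (0 : Int)))
  (PySem.List.pyRange 0 R 1).foldl (fun V i =>
    (PySem.List.pyRange 0 C 1).foldl (fun V j =>
      if PySem.List.pyGetD (PySem.List.pyGetD M i []) j "" == "X" then
        if i == 0 then
          PySem.List.pySetD V i (PySem.List.pySetD (PySem.List.pyGetD V i []) j 1)
        else
          PySem.List.pySetD V i (PySem.List.pySetD (PySem.List.pyGetD V i []) j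
            (PySem.List.pyGetD (PySem.List.pyGetD V (i - 1) []) j 0 + 1))
      else V) V) V

-- ===== PORT B =====
-- the while loop 'while k >= 0 and M[k][j] == 'X': k -= 1' (k starts at i ≥ 0; the Nat
-- structure of k encodes the 'k >= 0' test: from k = 0 one more step yields -1 and stops)
def bWalk (M : List (List String)) (j : Int) : Nat → Int
  | 0 => if PySem.List.pyGetD (PySem.List.pyGetD M ((0 : Nat) : Int) []) j "" == "X" then -1 else 0
  | (k+1) => if PySem.List.pyGetD (PySem.List.pyGetD M ((k+1 : Nat) : Int) []) j "" == "X" then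
               bWalk M j k
             else ((k+1 : Nat) : Int)

def createVMatrix_alt (M : List (List String)) (R : Int) (C : Int) : List (List Int) :=
  (PySem.List.pyRange 0 R 1).foldl (fun res i =>
    res ++ [(PySem.List.pyRange 0 C 1).foldl (fun row j =>
      row ++ [i - bWalk M j i.toNat]) []]) []

-- ===== PRECONDITION & SPEC =====
-- Pre_ excludes exactly the inputs on which Python A raises IndexError: when both loop bounds are
-- positive, M must have at least R rows and each of the first R rows at least C entries.
def Pre_createVMatrix (M : List (List String)) (R : Int) (C : Int) : Prop :=
  0 < R ∧ 0 < C → R ≤ (M.length : Int) ∧ ∀ row ∈ M.take R.toNat, C ≤ (row.length : Int)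
instance (M : List (List String)) (R : Int) (C : Int) : Decidable (Pre_createVMatrix M R C) := by
  unfold Pre_createVMatrix; infer_instance

def pvWitness_createVMatrix : List (List String) × Int × Int := ([["X", "."], [".", "X"]], 2, 2)

def Spec_createVMatrix (M : List (List String)) (R : Int) (C : Int) (out : List (List Int)) : Prop := out = createVMatrix_alt M R C
instance (M : List (List String)) (R : Int) (C : Int) (out : List (List Int)) : Decidable (Spec_createVMatrix M R C out) := by unfold Spec_createVMatrix; infer_instance

-- ===== CLAIM (what is proved, stated in full; the proofs are below) =====
def Claim_equal_createVMatrix : Prop := ∀ (M : List (List String)) (R : Int) (C : Int), Dom_createVMatrix M R C → Pre_createVMatrix M R C → Spec_createVMatrix M R C (createVMatrix M R C)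

-- ===== LEMMAS AND PROOFS =====

-- the cell test M[i][j] == 'X' both ports perform (total via pyGetD defaults)
def pvX (M : List (List String)) (i j : Nat) : Bool :=
  PySem.List.pyGetD (PySem.List.pyGetD M (i : Int) []) (j : Int) "" == "X"

-- the value both programs store at cell (i, j): the vertical run length of 'X's ending at row i
def pvVal (M : List (List String)) : Nat → Nat → Int
  | 0, j => if pvX M 0 j then 1 else 0
  | i+1, j => if pvX M (i+1) j then pvVal M i j + 1 else 0

-- row i of A's matrix after its inner loop has processed columns 0..j-1
def pvRow (M : List (List String)) (c i j : Nat) : List Int :=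
  (List.range c).map (fun t => if t < j then pvVal M i t else 0)

-- A's whole matrix when the outer loop is at row i and the inner loop has processed columns 0..j-1
def pvMk (M : List (List String)) (n c i j : Nat) : List (List Int) :=
  (List.range n).map (fun k =>
    if k < i then pvRow M c k c
    else if k = i then pvRow M c i j
    else (List.range c).map (fun _ => (0 : Int)))

-- the common value of both programs
def pvN (M : List (List String)) (n c : Nat) : List (List Int) :=
  (List.range n).map (fun i => (List.range c).map (fun j => pvVal M i j))

-- A's inner-loop body at row i, column j (the transliterated step of port A)
def pvStepA (M : List (List String)) (i : Nat) (V : List (List Int)) (j : Nat) : List (List Int) :=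
  if pvX M i j then
    if (i : Int) == 0 then
      PySem.List.pySetD V (i : Int) (PySem.List.pySetD (PySem.List.pyGetD V (i : Int) []) (j : Int) 1)
    else
      PySem.List.pySetD V (i : Int) (PySem.List.pySetD (PySem.List.pyGetD V (i : Int) []) (j : Int)
        (PySem.List.pyGetD (PySem.List.pyGetD V ((i : Int) - 1) []) (j : Int) 0 + 1))
  else V

lemma pvRange_toNat (b : Int) :
    PySem.List.pyRange 0 b 1 = List.map (fun k : Nat => (k : Int)) (List.range b.toNat) := by
  by_cases h : 0 ≤ b
  · conv_lhs => rw [← Int.toNat_of_nonneg h]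
    exact PySem.List.pyRange_zero_natCast b.toNat
  · rw [PySem.List.pyRange_one_eq_nil (by omega), Int.toNat_of_nonpos (by omega)]
    simp

lemma map_range_congr {α : Type} (c : Nat) (f g : Nat → α) (h : ∀ t, t < c → f t = g t) :
    (List.range c).map f = (List.range c).map g :=
  List.map_congr_left (fun t ht => h t (List.mem_range.mp ht))

lemma set_map_range {α : Type} (f : Nat → α) (c j : Nat) (v : α) :
    ((List.range c).map f).set j v = (List.range c).map (fun t => if t = j then v else f t) := by
  apply List.ext_getElem
  · simp
  · intro t h1 h2
    simp only [List.getElem_set, List.getElem_map, List.getElem_range]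
    rcases eq_or_ne t j with h | h
    · simp [h]
    · simp [h, Ne.symm h]

lemma pvVal_zero_of_not (M : List (List String)) (i j : Nat) (h : pvX M i j = false) :
    pvVal M i j = 0 := by
  cases i <;> simp [pvVal, h]

lemma pvRow_zero (M : List (List String)) (c i : Nat) :
    pvRow M c i 0 = (List.range c).map (fun _ => (0 : Int)) := by
  simp [pvRow]

lemma pvRow_set (M : List (List String)) (c i j : Nat) :
    (pvRow M c i j).set j (pvVal M i j) = pvRow M c i (j+1) := by
  rw [pvRow, set_map_range]
  apply map_range_congr
  intro t ht
  rcases eq_or_ne t j with h | h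
  · simp [h]
  · have : t < j + 1 ↔ t < j := by omega
    simp [h, this]

lemma pvRow_succ_of_not (M : List (List String)) (c i j : Nat) (h : pvX M i j = false) :
    pvRow M c i (j+1) = pvRow M c i j := by
  apply map_range_congr
  intro t ht
  rcases eq_or_ne t j with h' | h'
  · simp [h', pvVal_zero_of_not M i j h]
  · have : t < j + 1 ↔ t < j := by omega
    simp [this]

lemma pvMk_row (M : List (List String)) (n c i j : Nat) (hi : i < n) :
    PySem.List.pyGetD (pvMk M n c i j) (i : Int) [] = pvRow M c i j := by
  rw [PySem.List.pyGetD_natCast, pvMk, PySem.List.getD_map_range _ _ _ _ hi]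
  simp

lemma pvMk_row_lt (M : List (List String)) (n c i j s : Nat) (hs : s < i) (hn : s < n) :
    PySem.List.pyGetD (pvMk M n c i j) (s : Int) [] = pvRow M c s c := by
  rw [PySem.List.pyGetD_natCast, pvMk, PySem.List.getD_map_range _ _ _ _ hn]
  simp [hs]

lemma pvWrite (M : List (List String)) (n c i j : Nat) (hi : i < n) (v : Int)
    (hv : v = pvVal M i j) :
    PySem.List.pySetD (pvMk M n c i j) (i : Int)
      (PySem.List.pySetD (PySem.List.pyGetD (pvMk M n c i j) (i : Int) []) (j : Int) v)
    = pvMk M n c i (j+1) := by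
  rw [pvMk_row M n c i j hi, PySem.List.pySetD_natCast, PySem.List.pySetD_natCast, hv, pvRow_set]
  rw [pvMk, set_map_range]
  apply map_range_congr
  intro k hk
  rcases eq_or_ne k i with h | h
  · simp [h]
  · simp [h]

lemma pvStepA_eq (M : List (List String)) (n c i j : Nat) (hi : i < n) (hj : j < c) :
    pvStepA M i (pvMk M n c i j) j = pvMk M n c i (j+1) := by
  by_cases hx : pvX M i j
  · rw [pvStepA, if_pos hx]
    cases i with
    | zero =>
      rw [if_pos (by simp)]
      exact pvWrite M n c 0 j hi 1 (by simp [pvVal, hx])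
    | succ s =>
      rw [if_neg (by simp; omega)]
      have hc : ((s + 1 : Nat) : Int) - 1 = (s : Int) := by push_cast; ring
      rw [hc, pvMk_row_lt M n c (s+1) j s (by omega) (by omega)]
      have hg : PySem.List.pyGetD (pvRow M c s c) (j : Int) 0 = pvVal M s j := by
        rw [PySem.List.pyGetD_natCast, pvRow, PySem.List.getD_map_range _ _ _ _ hj]
        simp [hj]
      rw [hg]
      exact pvWrite M n c (s+1) j hi _ (by simp [pvVal, hx])
  · rw [pvStepA, if_neg hx]
    rw [pvMk, pvMk, pvRow_succ_of_not M c i j (by simpa using hx)]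

lemma pvInner (M : List (List String)) (n c i : Nat) (hi : i < n) :
    ∀ j, j ≤ c → (List.range j).foldl (pvStepA M i) (pvMk M n c i 0) = pvMk M n c i j := by
  intro j
  induction j with
  | zero => simp
  | succ m ih =>
    intro hm
    rw [List.range_succ, List.foldl_append, ih (by omega)]
    simpa using pvStepA_eq M n c i m hi (by omega)

lemma pvMk_step (M : List (List String)) (n c i : Nat) :
    pvMk M n c i c = pvMk M n c (i+1) 0 := by
  apply map_range_congr
  intro k hk
  rcases lt_trichotomy k i with h | h | h
  · simp [h, Nat.lt_succ_of_lt h]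
  · simp [h]
  · have h1 : ¬ k < i := by omega
    have h2 : k ≠ i := by omega
    have h3 : ¬ k < i + 1 := by omega
    rcases eq_or_ne k (i+1) with h4 | h4
    · simp [h4, pvRow_zero]
    · simp [h1, h2, h3, h4]

lemma pvOuter (M : List (List String)) (n c : Nat) :
    ∀ i, i ≤ n →
      (List.range i).foldl (fun V k => (List.range c).foldl (pvStepA M k) V) (pvMk M n c 0 0)
        = pvMk M n c i 0 := by
  intro i
  induction i with
  | zero => simp
  | succ m ih =>
    intro hm
    rw [List.range_succ, List.foldl_append, ih (by omega)]
    simp only [List.foldl_cons, List.foldl_nil]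
    rw [pvInner M n c m (by omega) c le_rfl, pvMk_step]

lemma pvMk_zero (M : List (List String)) (n c : Nat) :
    pvMk M n c 0 0 = (List.range n).map (fun _ => (List.range c).map (fun _ => (0 : Int))) := by
  apply map_range_congr
  intro k hk
  rcases eq_or_ne k 0 with h | h <;> simp [h, pvRow_zero]

lemma pvMk_final (M : List (List String)) (n c : Nat) :
    pvMk M n c n 0 = pvN M n c := by
  apply map_range_congr
  intro k hk
  simp only [if_pos hk]
  apply map_range_congr
  intro t ht
  simp [ht]

lemma portA_eq (M : List (List String)) (R C : Int) :
    createVMatrix M R C = pvN M R.toNat C.toNat := by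
  rw [createVMatrix]
  rw [pvRange_toNat R, pvRange_toNat C]
  simp only [List.foldl_map, List.map_map]
  have h := pvOuter M R.toNat C.toNat R.toNat le_rfl
  rw [pvMk_final] at h
  rw [← h, pvMk_zero]
  rfl

-- B's per-cell upward walk computes exactly the vertical run length: i - bWalk M j i = pvVal M i j
lemma pvWalk_eq (M : List (List String)) (j : Nat) :
    ∀ i : Nat, ((i : Nat) : Int) - bWalk M (j : Int) i = pvVal M i j := by
  intro i
  induction i with
  | zero =>
    by_cases hx : pvX M 0 j
    · simp only [bWalk, pvVal]
      rw [if_pos (by simpa [pvX] using hx), if_pos hx]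
      norm_num
    · simp only [bWalk, pvVal]
      rw [if_neg (by simpa [pvX] using hx), if_neg hx]
      norm_num
  | succ m ih =>
    by_cases hx : pvX M (m+1) j
    · simp only [bWalk, pvVal]
      rw [if_pos (by simpa [pvX] using hx), if_pos hx, ← ih]
      push_cast; ring
    · simp only [bWalk, pvVal]
      rw [if_neg (by simpa [pvX] using hx), if_neg hx]
      ring

-- an appending foldl is a map
lemma pvFoldPush {α β : Type} (f : α → β) :
    ∀ (l : List α) (acc : List β),
      l.foldl (fun a x => a ++ [f x]) acc = acc ++ l.map f := by
  intro l
  induction l with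
  | nil => simp
  | cons x xs ih => intro acc; simp [ih]

lemma portB_eq (M : List (List String)) (R C : Int) :
    createVMatrix_alt M R C = pvN M R.toNat C.toNat := by
  rw [createVMatrix_alt]
  rw [pvRange_toNat R, pvRange_toNat C]
  simp only [List.foldl_map]
  rw [pvFoldPush (fun i : Nat =>
    (List.range C.toNat).foldl (fun row (j : Nat) =>
      row ++ [((i : Nat) : Int) - bWalk M (j : Int) ((i : Nat) : Int).toNat]) [])]
  simp only [List.nil_append, pvN]
  apply map_range_congr
  intro i hi
  rw [pvFoldPush (fun j : Nat => ((i : Nat) : Int) - bWalk M (j : Int) ((i : Nat) : Int).toNat)]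
  simp only [List.nil_append]
  apply map_range_congr
  intro j hj
  rw [Int.toNat_natCast]
  exact pvWalk_eq M j i

-- ===== VERDICT (by name: the statement is the Claim_ definition above) =====
theorem createVMatrix_spec : Claim_equal_createVMatrix := by
  intro M R C _ _
  unfold Spec_createVMatrix
  rw [portA_eq, portB_eq]
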